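-- pv_equiv track=rewrite | github.com/CSOS-Study/Python_Algorithm | 백준 단계별로 풀어보기/5. 1차원 배열/6. OX퀴즈/강문영.py | confirm_score
-- ===== SOURCE A (Python) =====
-- def confirm_score(result):
--     result_score = 0
--     cnt = 0
--     for i in result:
--         if i == 'O':
--             cnt += 1
--         else:
--             result_score += sum(range(1, cnt + 1))
--             cnt = 0
--
--     result_score += sum(range(1, cnt + 1))
--
--     return result_score
-- ===== SOURCE B (Python) =====
-- def confirm_score(result):
--     # Scan run-by-run: find each maximal run of 'O' with an inner index scan and
--     # add its triangular number k*(k+1)//2 in closed form.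
--     score = 0
--     i = 0
--     n = len(result)
--     while i < n:
--         if result[i] == 'O':
--             j = i
--             while j < n and result[j] == 'O':
--                 j += 1
--             k = j - i
--             score += k * (k + 1) // 2
--             i = j
--         else:
--             i += 1
--     return score
-- ===== Notes on version B (the rewrite author's own statement) =====
-- stated objective: faster
-- what changed: B scans the input run-by-run (an outer loop over runs with an inner scan finding each maximal run of O's) and adds each run's score in closed form k*(k+1)//2, instead of A's per-character pass maintaining a counter flushed as sum(range(1,cnt+1)) at every run boundary and after the loop; no range objects are built.
import Mathlib
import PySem

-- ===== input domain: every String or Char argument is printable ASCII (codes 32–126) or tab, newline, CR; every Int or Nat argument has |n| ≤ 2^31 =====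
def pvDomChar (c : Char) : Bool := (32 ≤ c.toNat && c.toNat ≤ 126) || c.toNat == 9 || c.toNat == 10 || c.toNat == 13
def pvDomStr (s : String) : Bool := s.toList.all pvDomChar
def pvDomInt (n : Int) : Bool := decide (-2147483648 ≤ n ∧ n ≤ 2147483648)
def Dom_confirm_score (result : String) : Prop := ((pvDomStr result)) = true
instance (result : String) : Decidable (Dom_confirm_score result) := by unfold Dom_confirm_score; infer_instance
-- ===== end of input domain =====

-- B scans run-by-run (inner scan of each maximal O-run, closed form k*(k+1)//2)
-- instead of A's per-character counter flushed as range sums at boundaries.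

-- ===== PORT A =====
-- state = (result_score, cnt); sum(range(1, cnt+1)) ported literally as a pyRange sum
def confirm_score (result : String) : Int :=
  let st := result.toList.foldl
    (fun (st : Int × Int) i =>
      if i = 'O' then (st.1, st.2 + 1)
      else (st.1 + (PySem.List.pyRange 1 (st.2 + 1) 1).sum, 0))
    (0, 0)
  st.1 + (PySem.List.pyRange 1 (st.2 + 1) 1).sum

-- ===== PORT B =====
-- inner while `while j < n and result[j] == 'O': j += 1`: length of the leading O-run …
def pvCountO : List Char → Nat
  | [] => 0
  | c :: rest => if c = 'O' then pvCountO rest + 1 else 0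

-- … and the rest of the input after that run (advancing i to j)
def pvDropO : List Char → List Char
  | [] => []
  | c :: rest => if c = 'O' then pvDropO rest else c :: rest

lemma pvDropO_length_le (l : List Char) : (pvDropO l).length ≤ l.length := by
  induction l with
  | nil => simp [pvDropO]
  | cons c rest ih =>
    simp only [pvDropO]
    split
    · exact Nat.le_succ_of_le ih
    · simp

-- outer while: at an 'O', score += k*(k+1)//2 for the run length k, continue after it
def pvRuns : List Char → Int
  | [] => 0
  | c :: rest =>
      if c = 'O' then
        PySem.Int.floordiv ((pvCountO (c :: rest) : Int) * ((pvCountO (c :: rest) : Int) + 1)) 2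
          + pvRuns (pvDropO rest)
      else pvRuns rest
termination_by l => l.length
decreasing_by
  · exact Nat.lt_succ_of_le (pvDropO_length_le rest)
  · simp

def confirm_score_alt (result : String) : Int := pvRuns result.toList

-- ===== PRECONDITION & SPEC =====
def Spec_confirm_score (result : String) (out : Int) : Prop := out = confirm_score_alt result
instance (result : String) (out : Int) : Decidable (Spec_confirm_score result out) := by unfold Spec_confirm_score; infer_instance

-- ===== CLAIM (what is proved, stated in full; the proofs are below) =====
def Claim_equal_confirm_score : Prop := ∀ (result : String), Dom_confirm_score result → Spec_confirm_score result (confirm_score result)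

-- ===== LEMMAS AND PROOFS =====
def pvTri (c : Int) : Int := (PySem.List.pyRange 1 (c + 1) 1).sum

lemma pvTri_succ (c : Int) (hc : 0 ≤ c) : pvTri (c + 1) = pvTri c + (c + 1) := by
  unfold pvTri
  rw [PySem.List.pyRange_one_succ_right (by omega : (1 : Int) ≤ c + 1)]
  simp

lemma pvTri_double (c : Nat) : 2 * pvTri (c : Int) = (c : Int) * ((c : Int) + 1) := by
  induction c with
  | zero => decide
  | succ k ih =>
    have hstep : pvTri ((k : Int) + 1) = pvTri (k : Int) + ((k : Int) + 1) :=
      pvTri_succ _ (by positivity)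
    push_cast [hstep]
    push_cast at ih
    linarith

lemma pvTri_closed (c : Nat) :
    PySem.Int.floordiv ((c : Int) * ((c : Int) + 1)) 2 = pvTri (c : Int) := by
  rw [PySem.Int.floordiv_eq_ediv_of_pos (by norm_num), ← pvTri_double c,
    Int.mul_ediv_cancel_left _ (by norm_num)]

lemma pvCountO_rep_stop (c : Nat) (x : Char) (xs : List Char) (hx : x ≠ 'O') :
    pvCountO (List.replicate c 'O' ++ x :: xs) = c := by
  induction c with
  | zero => simp [pvCountO, hx]
  | succ k ih => simp [List.replicate_succ, pvCountO, ih]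

lemma pvDropO_rep_stop (c : Nat) (x : Char) (xs : List Char) (hx : x ≠ 'O') :
    pvDropO (List.replicate c 'O' ++ x :: xs) = x :: xs := by
  induction c with
  | zero => simp [pvDropO, hx]
  | succ k ih => simp [List.replicate_succ, pvDropO, ih]

lemma pvCountO_rep (k : Nat) : pvCountO (List.replicate k 'O') = k := by
  induction k with
  | zero => rfl
  | succ m ih => simp [List.replicate_succ, pvCountO, ih]

lemma pvDropO_rep (k : Nat) : pvDropO (List.replicate k 'O') = [] := by
  induction k with
  | zero => rfl
  | succ m ih => simp [List.replicate_succ, pvDropO, ih]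

lemma pvRuns_nil : pvRuns [] = 0 := by rw [pvRuns]

lemma pvRuns_rep_nil (c : Nat) : pvRuns (List.replicate c 'O') = pvTri (c : Int) := by
  cases c with
  | zero => simpa [List.replicate, pvRuns_nil] using (by decide : (0 : Int) = pvTri ((0 : Nat) : Int))
  | succ k =>
    rw [List.replicate_succ, pvRuns, if_pos rfl]
    have hc : pvCountO ('O' :: List.replicate k 'O') = k + 1 := by
      simp [pvCountO, pvCountO_rep k]
    rw [hc, pvDropO_rep k, pvRuns_nil, pvTri_closed]
    push_cast
    ring_nf

lemma pvRuns_rep_stop (c : Nat) (x : Char) (xs : List Char) (hx : x ≠ 'O') :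
    pvRuns (List.replicate c 'O' ++ x :: xs) = pvTri (c : Int) + pvRuns xs := by
  cases c with
  | zero =>
    have h0 : pvTri ((0 : Nat) : Int) = 0 := by decide
    simp only [List.replicate, List.nil_append, h0, zero_add]
    rw [pvRuns, if_neg hx]
  | succ k =>
    rw [List.replicate_succ, List.cons_append, pvRuns, if_pos rfl]
    have hc : pvCountO ('O' :: (List.replicate k 'O' ++ x :: xs)) = k + 1 := by
      simp [pvCountO, pvCountO_rep_stop k x xs hx]
    rw [hc, pvDropO_rep_stop k x xs hx, pvRuns, if_neg hx, pvTri_closed]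

lemma pv_invariant (l : List Char) : ∀ (s : Int) (c : Nat),
    (l.foldl (fun (st : Int × Int) i =>
        if i = 'O' then (st.1, st.2 + 1)
        else (st.1 + (PySem.List.pyRange 1 (st.2 + 1) 1).sum, 0)) (s, (c : Int))).1
      + pvTri (l.foldl (fun (st : Int × Int) i =>
        if i = 'O' then (st.1, st.2 + 1)
        else (st.1 + (PySem.List.pyRange 1 (st.2 + 1) 1).sum, 0)) (s, (c : Int))).2
    = s + pvRuns (List.replicate c 'O' ++ l) := by
  induction l with
  | nil =>
    intro s c
    simpa [pvTri] using congrArg (fun t => s + t) (pvRuns_rep_nil c).symm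
  | cons x xs ih =>
    intro s c
    simp only [List.foldl_cons]
    by_cases hx : x = 'O'
    · simp only [hx, if_true]
      have := ih s (c + 1)
      push_cast at this
      rw [this]
      congr 2
      rw [List.replicate_succ', List.append_assoc]
      rfl
    · simp only [if_neg hx]
      have := ih (s + (PySem.List.pyRange 1 ((c : Int) + 1) 1).sum) 0
      simp only [List.replicate, List.nil_append, Nat.cast_zero] at this
      rw [this, pvRuns_rep_stop c x xs hx]
      have : (PySem.List.pyRange 1 ((c : Int) + 1) 1).sum = pvTri (c : Int) := rfl
      rw [this]; ring

-- ===== VERDICT (by name: the statement is the Claim_ definition above) =====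
theorem confirm_score_spec : Claim_equal_confirm_score := by
  intro result _
  unfold Spec_confirm_score confirm_score confirm_score_alt
  have := pv_invariant result.toList 0 0
  simpa [pvTri] using this
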